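-- pv_equiv track=rewrite | github.com/sobomax/g729_to_dtmf.ai | read_g729_data.py | bin2int
-- ===== SOURCE A (Python) =====
-- BIT_1 = 0x0081
--
-- def bin2int(no_of_bits, frame):
--     value = 0
--     for i in range(0, no_of_bits):
--         value <<= 1
--         bit = frame & 0xffff
--         frame >>= 16
--         if bit == BIT_1:
--             value += 1
--     return(value);
-- ===== SOURCE B (Python) =====
-- BIT_1 = 0x0081
--
-- def bin2int(no_of_bits, frame):
--     if no_of_bits <= 0:
--         return 0
--     bits = ''.join('1' if (frame >> (16 * i)) & 0xffff == BIT_1 else '0'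
--                    for i in range(no_of_bits))
--     return int(bits, 2)
-- ===== Notes on version B (the rewrite author's own statement) =====
-- stated objective: idiomatic
-- what changed: B replaces A's stateful loop (shifting an integer accumulator left while consuming 16-bit words off a mutated frame) with a declarative pipeline: extract word i by a fixed shift, map each word to a '1'/'0' character MSB-first, and parse the string with int(s, 2).
import Mathlib
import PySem

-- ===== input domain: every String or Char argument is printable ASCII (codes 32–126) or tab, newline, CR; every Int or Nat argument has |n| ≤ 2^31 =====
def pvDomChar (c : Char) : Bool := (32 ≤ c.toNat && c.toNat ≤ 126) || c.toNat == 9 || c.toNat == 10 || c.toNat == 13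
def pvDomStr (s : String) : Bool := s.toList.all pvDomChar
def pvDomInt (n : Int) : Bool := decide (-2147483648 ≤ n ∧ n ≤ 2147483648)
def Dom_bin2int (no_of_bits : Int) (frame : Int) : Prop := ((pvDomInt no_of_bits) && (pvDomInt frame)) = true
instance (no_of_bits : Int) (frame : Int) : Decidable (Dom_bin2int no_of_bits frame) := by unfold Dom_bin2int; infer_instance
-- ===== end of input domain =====

-- B re-implements A's shifting-accumulator loop as an MSB-first binary string parsed by a
-- radix-2 conversion (objective: idiomatic); same return value on every input.

-- ===== PORT A =====
-- loop state (value, frame); value <<= 1; bit = frame & 0xffff; frame >>= 16; if bit == BIT_1: value += 1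
def bin2int (no_of_bits : Int) (frame : Int) : Int :=
  ((PySem.List.pyRange 0 no_of_bits 1).foldl
    (fun (st : Int × Int) _ =>
      let value := st.1 <<< (1 : Nat)
      let bit := PySem.Int.band st.2 0xffff
      let frame := st.2 >>> (16 : Nat)
      (if bit == 0x0081 then value + 1 else value, frame))
    (0, frame)).1

-- ===== PORT B =====
def bin2int_alt (no_of_bits : Int) (frame : Int) : Int :=
  if no_of_bits ≤ 0 then 0
  else
    -- '1' if (frame >> (16*i)) & 0xffff == BIT_1 else '0', for i in range(no_of_bits)
    let bits : List Char := (PySem.List.pyRange 0 no_of_bits 1).map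
      (fun i => if PySem.Int.band (frame >>> (16 * i).toNat) 0xffff == 0x0081 then '1' else '0')
    -- int(bits, 2): base-2 digit fold, exact here since bits holds only '0'/'1' (hand port)
    bits.foldl (fun acc c => 2 * acc + (if c == '1' then (1 : Int) else 0)) 0

-- ===== PRECONDITION & SPEC =====
def Spec_bin2int (no_of_bits : Int) (frame : Int) (out : Int) : Prop := out = bin2int_alt no_of_bits frame
instance (no_of_bits : Int) (frame : Int) (out : Int) : Decidable (Spec_bin2int no_of_bits frame out) := by unfold Spec_bin2int; infer_instance

-- ===== CLAIM (what is proved, stated in full; the proofs are below) =====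
def Claim_equal_bin2int : Prop := ∀ (no_of_bits : Int) (frame : Int), Dom_bin2int no_of_bits frame → Spec_bin2int no_of_bits frame (bin2int no_of_bits frame)

-- ===== LEMMAS AND PROOFS =====

-- common reference value: n low 16-bit words of frame folded MSB-first onto accumulator v
def pvRef : Nat → Int → Int → Int
  | 0, _, v => v
  | n+1, frame, v =>
      pvRef n (frame >>> (16 : Nat))
        (2 * v + (if PySem.Int.band frame 0xffff == 0x0081 then 1 else 0))

lemma pvA_eq (l : List Int) : ∀ (frame v : Int),
    (l.foldl
      (fun (st : Int × Int) _ =>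
        let value := st.1 <<< (1 : Nat)
        let bit := PySem.Int.band st.2 0xffff
        let frame := st.2 >>> (16 : Nat)
        (if bit == 0x0081 then value + 1 else value, frame))
      (v, frame)).1 = pvRef l.length frame v := by
  induction l with
  | nil => intro frame v; simp [pvRef]
  | cons a t ih =>
      intro frame v
      simp only [List.foldl_cons, List.length_cons, pvRef]
      rw [ih]
      have hsh : v <<< (1 : Nat) = 2 * v := by rw [Int.shiftLeft_eq]; ring
      congr 1
      split <;> simp [hsh]

lemma pvB_eq : ∀ (n : Nat) (frame v : Int),
    (((List.range n).map
        (fun k : Nat => if PySem.Int.band (frame >>> ((16 * k : Nat))) 0xffff == 0x0081 then '1' else '0')).foldl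
      (fun acc c => 2 * acc + (if c == '1' then (1 : Int) else 0)) v) = pvRef n frame v := by
  intro n
  induction n with
  | zero => intro frame v; simp [pvRef]
  | succ m ih =>
      intro frame v
      rw [List.range_succ_eq_map]
      simp only [List.map_cons, List.map_map, List.foldl_cons, Function.comp_def]
      have h16 : ∀ k : Nat, frame >>> (16 * (k + 1)) = (frame >>> (16 : Nat)) >>> (16 * k) := by
        intro k
        rw [← Int.shiftRight_add]
        congr 1
        ring
      simp only [h16, Nat.mul_zero, Int.shiftRight_zero]
      rw [ih (frame >>> (16 : Nat))]
      show _ = pvRef (m + 1) frame v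
      simp only [pvRef]
      congr 1
      split <;> simp

theorem bin2int_spec : Claim_equal_bin2int := by
  intro no_of_bits frame _
  unfold Spec_bin2int bin2int bin2int_alt
  by_cases h : no_of_bits ≤ 0
  · simp [h, PySem.List.pyRange_one_eq_nil h]
  · simp only [h, if_false]
    rw [PySem.List.pyRange_one, pvA_eq]
    simp only [List.map_map, List.length_map, List.length_range, Function.comp_def,
      Int.shiftRight_natCast_right]
    have hmap :
        (List.range (no_of_bits - 0).toNat).map
          (fun k : Nat =>
            if PySem.Int.band (frame >>> (16 * ((0 : Int) + k)).toNat) 0xffff == 0x0081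
            then '1' else '0')
        = (List.range (no_of_bits - 0).toNat).map
          (fun k : Nat =>
            if PySem.Int.band (frame >>> (16 * k)) 0xffff == 0x0081 then '1' else '0') := by
      apply List.map_congr_left
      intro k _
      have : ((16 * ((0 : Int) + k)).toNat) = 16 * k := by omega
      rw [this]
    rw [hmap, pvB_eq]
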